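-- pv_equiv track=rewrite | github.com/JesseWebDotCom/loki-doki | lokidoki/orchestrator/documents/retrieval.py | _overlap_tail
-- ===== SOURCE A (Python) =====
-- def _overlap_tail(buffer: list[str], overlap_chars: int) -> list[str]:
--     """Pick the trailing sentences whose combined length covers the overlap."""
--     if overlap_chars <= 0:
--         return []
--     tail: list[str] = []
--     acc = 0
--     for sentence in reversed(buffer):
--         tail.insert(0, sentence)
--         acc += len(sentence) + 1
--         if acc >= overlap_chars:
--             break
--     return tail
-- ===== SOURCE B (Python) =====
-- def _overlap_tail(buffer: list[str], overlap_chars: int) -> list[str]: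
--     """Pick the trailing sentences whose combined length covers the overlap."""
--     if overlap_chars <= 0:
--         return []
--     remaining = sum(len(s) + 1 for s in buffer)
--     i = 0
--     while i < len(buffer) and remaining - (len(buffer[i]) + 1) >= overlap_chars:
--         remaining -= len(buffer[i]) + 1
--         i += 1
--     return buffer[i:]
-- ===== Notes on version B (the rewrite author's own statement) =====
-- stated objective: alternative
-- what changed: Instead of scanning the buffer in reverse and growing a tail with insert(0, ...) until the accumulator reaches the threshold, B sums all sentence lengths once, then scans forward greedily dropping leading sentences while the remaining suffix still covers overlap_chars, returning one slice.
import Mathlib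
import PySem

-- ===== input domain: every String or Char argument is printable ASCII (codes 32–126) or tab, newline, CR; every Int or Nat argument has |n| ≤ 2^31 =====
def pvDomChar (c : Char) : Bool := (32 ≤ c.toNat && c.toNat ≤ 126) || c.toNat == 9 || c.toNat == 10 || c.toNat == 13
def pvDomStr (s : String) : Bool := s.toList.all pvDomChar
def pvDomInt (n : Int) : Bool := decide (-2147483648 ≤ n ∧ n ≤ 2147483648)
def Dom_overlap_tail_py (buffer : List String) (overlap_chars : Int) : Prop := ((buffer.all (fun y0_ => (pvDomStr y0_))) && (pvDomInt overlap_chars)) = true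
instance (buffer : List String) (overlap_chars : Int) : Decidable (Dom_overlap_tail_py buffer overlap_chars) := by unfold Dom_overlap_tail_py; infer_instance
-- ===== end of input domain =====

-- B replaces A's reverse scan that grows a tail with insert(0, ...) by a forward greedy pass:
-- sum all lengths once, drop leading sentences while the remaining suffix still covers the
-- overlap, return the rest (objective: alternative decomposition, same result).

-- ===== PORT A =====
-- the for-loop over reversed(buffer) with tail.insert(0, sentence), acc accumulation and break
def otpLoopA : List String → Int → Int → List String → List String
  | [], _, _, tail => tail
  | s :: rest, acc, oc, tail =>
    let tail' := s :: tail              -- tail.insert(0, sentence)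
    let acc' := acc + PySem.Str.len s + 1
    if acc' ≥ oc then tail'             -- break
    else otpLoopA rest acc' oc tail'

def overlap_tail_py (buffer : List String) (overlap_chars : Int) : List String :=
  if overlap_chars ≤ 0 then []
  else otpLoopA buffer.reverse 0 overlap_chars []

-- ===== PORT B =====
-- remaining = sum(len(s) + 1 for s in buffer)
def otpTotal : List String → Int
  | [] => 0
  | s :: rest => (PySem.Str.len s + 1) + otpTotal rest

-- the while loop: drop buffer[0] while the remaining suffix still covers overlap_chars;
-- the index i into buffer is represented by recursing on the not-yet-dropped suffix
def otpDrop : List String → Int → Int → List String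
  | [], _, _ => []
  | s :: rest, remaining, oc =>
    if remaining - (PySem.Str.len s + 1) ≥ oc then
      otpDrop rest (remaining - (PySem.Str.len s + 1)) oc
    else s :: rest

def overlap_tail_py_alt (buffer : List String) (overlap_chars : Int) : List String :=
  if overlap_chars ≤ 0 then []
  else otpDrop buffer (otpTotal buffer) overlap_chars

-- ===== PRECONDITION & SPEC =====
def Spec_overlap_tail_py (buffer : List String) (overlap_chars : Int) (out : List String) : Prop := out = overlap_tail_py_alt buffer overlap_chars
instance (buffer : List String) (overlap_chars : Int) (out : List String) : Decidable (Spec_overlap_tail_py buffer overlap_chars out) := by unfold Spec_overlap_tail_py; infer_instance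

-- ===== CLAIM =====
def Claim_equal_overlap_tail_py : Prop := ∀ (buffer : List String) (overlap_chars : Int), Dom_overlap_tail_py buffer overlap_chars → Spec_overlap_tail_py buffer overlap_chars (overlap_tail_py buffer overlap_chars)

-- ===== LEMMAS AND PROOFS =====

theorem otpTotal_nonneg (l : List String) : 0 ≤ otpTotal l := by
  induction l with
  | nil => simp [otpTotal]
  | cons s rest ih =>
    have : (0:Int) ≤ PySem.Str.len s := by simp [PySem.Str.len_eq]
    simp only [otpTotal]; omega

theorem otpTotal_snoc (l : List String) (x : String) :
    otpTotal (l ++ [x]) = otpTotal l + (PySem.Str.len x + 1) := by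
  induction l with
  | nil => simp [otpTotal]
  | cons s rest ih => simp only [List.cons_append, otpTotal, ih]; ring

theorem otpTotal_reverse (l : List String) : otpTotal l.reverse = otpTotal l := by
  induction l with
  | nil => rfl
  | cons s rest ih =>
    simp only [List.reverse_cons, otpTotal_snoc, ih, otpTotal]; ring

-- A's loop on l ++ [x]: it breaks inside l iff the largest partial sum acc + otpTotal l
-- reaches oc (the partial sums increase), else it also consumes x
theorem otpLoopA_snoc (l : List String) (x : String) (acc oc : Int) (tail : List String) :
    otpLoopA (l ++ [x]) acc oc tail =
      if acc + otpTotal l ≥ oc ∧ l ≠ [] then otpLoopA l acc oc tail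
      else x :: (l.reverse ++ tail) := by
  induction l generalizing acc tail with
  | nil =>
    simp only [List.nil_append, otpLoopA, otpTotal]
    split_ifs with h1 h2 <;> simp_all
  | cons y l' ih =>
    simp only [List.cons_append, otpLoopA]
    by_cases hb : acc + PySem.Str.len y + 1 ≥ oc
    · have hc : acc + otpTotal (y :: l') ≥ oc ∧ (y :: l') ≠ [] := by
        have := otpTotal_nonneg l'
        refine ⟨?_, by simp⟩
        simp only [otpTotal]; omega
      have hb' : oc ≤ acc + (y.length : Int) + 1 := by
        simpa [PySem.Str.len_eq] using hb
      simp [hc, hb']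
    · rw [if_neg hb, ih]
      have hEq : (acc + PySem.Str.len y + 1 + otpTotal l' ≥ oc ∧ l' ≠ []) ↔
          (acc + otpTotal (y :: l') ≥ oc ∧ (y :: l') ≠ []) := by
        constructor
        · rintro ⟨h1, _⟩
          refine ⟨by simp only [otpTotal]; omega, by simp⟩
        · rintro ⟨h1, _⟩
          have h1' : acc + PySem.Str.len y + 1 + otpTotal l' ≥ oc := by
            simp only [otpTotal] at h1; omega
          refine ⟨h1', ?_⟩
          rintro rfl
          simp only [otpTotal] at h1'
          omega
      split_ifs with h1 h2 h2
      · rfl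
      · exact absurd (hEq.mp h1) h2
      · exact absurd (hEq.mpr h2) h1
      · simp

theorem otp_main (buffer : List String) (oc : Int) (hoc : 0 < oc) :
    otpLoopA buffer.reverse 0 oc [] = otpDrop buffer (otpTotal buffer) oc := by
  induction buffer with
  | nil => rfl
  | cons x rest ih =>
    rw [List.reverse_cons, otpLoopA_snoc]
    simp only [otpDrop, otpTotal]
    have hsub : PySem.Str.len x + 1 + otpTotal rest - (PySem.Str.len x + 1) = otpTotal rest := by
      ring
    rw [hsub, otpTotal_reverse]
    by_cases hge : otpTotal rest ≥ oc
    · have hne : rest.reverse ≠ [] := by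
        rcases rest with _ | _
        · simp only [otpTotal] at hge; omega
        · simp
      rw [if_pos ⟨by omega, hne⟩, if_pos hge, ih]
    · rw [if_neg (by rintro ⟨h1, _⟩; omega), if_neg hge]
      simp

-- ===== VERDICT =====
theorem overlap_tail_py_spec : Claim_equal_overlap_tail_py := by
  intro buffer oc _
  show overlap_tail_py buffer oc = overlap_tail_py_alt buffer oc
  unfold overlap_tail_py overlap_tail_py_alt
  split_ifs with h
  · rfl
  · exact otp_main buffer oc (by omega)
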